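-- pv_equiv track=rewrite | github.com/NicolasZanin/Project_WebShell | webshell3.py | findIndexCommand
-- ===== SOURCE A (Python) =====
-- def findIndexCommand(data,char,string): #return the index of the command
--     x,y = (-1,-1)
--     for i in range(len(data)):
--         if data[i] == char and x==-1:
--             x = i+1
--         if data[i:i+15] == string:
--             y = i
--     return x,y
-- ===== SOURCE B (Python) =====
-- def findIndexCommand(data, char, string):
--     # x: forward scan, stop at the first character equal to char
--     x = next((i + 1 for i, c in enumerate(data) if c == char), -1)
--     # y: backward scan, stop at the first (i.e. last) 15-char window equal to string
--     y = -1
--     for i in range(len(data) - 1, -1, -1):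
--         if data[i:i+15] == string:
--             y = i
--             break
--     return x, y
-- ===== Notes on version B (the rewrite author's own statement) =====
-- stated objective: alternative
-- what changed: Replaced the single full-length loop maintaining both results with two independent early-exit scans: a forward scan that stops at the first character hit, and a backward scan that stops at the first (i.e. last) 15-char window match.
import Mathlib
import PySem

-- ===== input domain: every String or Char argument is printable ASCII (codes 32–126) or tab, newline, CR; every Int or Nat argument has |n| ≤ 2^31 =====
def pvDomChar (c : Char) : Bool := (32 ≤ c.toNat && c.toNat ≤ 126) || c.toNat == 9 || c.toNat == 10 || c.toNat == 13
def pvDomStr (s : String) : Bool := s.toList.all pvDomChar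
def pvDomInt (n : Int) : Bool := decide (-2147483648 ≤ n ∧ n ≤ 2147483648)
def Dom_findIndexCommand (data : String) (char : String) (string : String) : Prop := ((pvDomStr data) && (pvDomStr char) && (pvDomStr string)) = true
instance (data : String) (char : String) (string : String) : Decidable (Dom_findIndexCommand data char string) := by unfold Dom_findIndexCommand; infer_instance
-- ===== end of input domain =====

-- B replaces A's single full loop by two independent early-exit scans (forward for x, backward for y); alternative decomposition, same worst-case cost.


-- ===== PORT A =====
-- A: one pass over range(len(data)) threading the pair (x, y).
-- data[i] == char is ported as the 1-char slice comparison data[i:i+1] == char,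
-- exact because i is always in range here (Python's data[i] is then the string data[i:i+1]).
def findIndexCommand (data : String) (char : String) (string : String) : Int × Int :=
  let l := data.toList
  let c := char.toList
  let s := string.toList
  (PySem.List.pyRange 0 (l.length : Int) 1).foldl
    (fun (xy : Int × Int) i =>
      (if PySem.List.slice l (some i) (some (i + 1)) = c ∧ xy.1 = -1 then i + 1 else xy.1,
       if PySem.List.slice l (some i) (some (i + 15)) = s then i else xy.2))
    (-1, -1)

-- ===== PORT B =====
-- forward scan with enumerate: first i with data[i] == char gives i+1, else -1
def ficFirst (c : List Char) : List Char → Int → Int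
  | [], _ => -1
  | h :: t, i => if [h] = c then i + 1 else ficFirst c t (i + 1)

-- backward scan over the index list range(len-1, -1, -1): first hit (= last match), else -1
def ficLast (l s : List Char) : List Int → Int
  | [] => -1
  | i :: rest => if PySem.List.slice l (some i) (some (i + 15)) = s then i else ficLast l s rest

def findIndexCommand_alt (data : String) (char : String) (string : String) : Int × Int :=
  let l := data.toList
  (ficFirst char.toList l 0,
   ficLast l string.toList (PySem.List.pyRange ((l.length : Int) - 1) (-1) (-1)))

-- ===== PRECONDITION & SPEC =====
def Spec_findIndexCommand (data : String) (char : String) (string : String) (out : Int × Int) : Prop := out = findIndexCommand_alt data char string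
instance (data : String) (char : String) (string : String) (out : Int × Int) : Decidable (Spec_findIndexCommand data char string out) := by unfold Spec_findIndexCommand; infer_instance

-- ===== CLAIM (what is proved, stated in full; the proofs are below) =====
def Claim_equal_findIndexCommand : Prop := ∀ (data : String) (char : String) (string : String), Dom_findIndexCommand data char string → Spec_findIndexCommand data char string (findIndexCommand data char string)

-- ===== LEMMAS AND PROOFS =====

-- the two components of A's fold, separated
def stepX (l c : List Char) (x i : Int) : Int :=
  if PySem.List.slice l (some i) (some (i + 1)) = c ∧ x = -1 then i + 1 else x

def stepY (l s : List Char) (y i : Int) : Int :=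
  if PySem.List.slice l (some i) (some (i + 15)) = s then i else y

-- ficLast with an arbitrary default, for the append induction
def gLast (l s : List Char) : List Int → Int → Int
  | [], y => y
  | i :: rest, y => if PySem.List.slice l (some i) (some (i + 15)) = s then i else gLast l s rest y

lemma foldl_split (l c s : List Char) (is : List Int) (x y : Int) :
    is.foldl (fun (xy : Int × Int) i =>
      (if PySem.List.slice l (some i) (some (i + 1)) = c ∧ xy.1 = -1 then i + 1 else xy.1,
       if PySem.List.slice l (some i) (some (i + 15)) = s then i else xy.2)) (x, y)
    = (is.foldl (stepX l c) x, is.foldl (stepY l s) y) := by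
  induction is generalizing x y with
  | nil => rfl
  | cons i rest ih => simp [List.foldl, stepX, stepY, ih]

lemma foldl_stepX_freeze (l c : List Char) (is : List Int) (x : Int) (hx : x ≠ -1) :
    is.foldl (stepX l c) x = x := by
  induction is with
  | nil => rfl
  | cons i rest ih => simp [List.foldl, stepX, hx, ih]

lemma slice_one (l : List Char) (j : Nat) (hj : j < l.length) :
    PySem.List.slice l (some (j : Int)) (some ((j : Int) + 1)) = [l[j]] := by
  have h1 : ((j : Int) + 1) = (((j + 1 : Nat)) : Int) := by push_cast; ring
  rw [h1, PySem.List.slice_natCast]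
  have : j + 1 - j = 1 := by omega
  rw [this, List.drop_eq_getElem_cons hj]
  rfl

lemma foldl_stepX_eq_ficFirst (l c : List Char) :
    ∀ j : Nat, j ≤ l.length →
      (PySem.List.pyRange (j : Int) (l.length : Int) 1).foldl (stepX l c) (-1)
        = ficFirst c (l.drop j) (j : Int) := by
  intro j hj
  induction hn : l.length - j generalizing j with
  | zero =>
      have hje : j = l.length := by omega
      subst hje
      rw [PySem.List.pyRange_one_eq_nil (by omega), List.drop_length]
      rfl
  | succ n ih =>
      have hjl : j < l.length := by omega
      rw [PySem.List.pyRange_one_cons (by exact_mod_cast hjl),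
          List.drop_eq_getElem_cons hjl]
      have hcast : ((j : Int) + 1) = (((j + 1 : Nat)) : Int) := by push_cast; ring
      simp only [List.foldl, stepX, slice_one l j hjl, ficFirst]
      by_cases hc : [l[j]] = c
      · rw [if_pos (by simp [hc]), if_pos hc, foldl_stepX_freeze _ _ _ _ (by omega)]
      · rw [if_neg (by simp [hc]), if_neg hc, hcast]
        exact ih (j + 1) (by omega) (by omega)

lemma gLast_append (l s : List Char) (as : List Int) (i y : Int) :
    gLast l s (as ++ [i]) y
      = gLast l s as (if PySem.List.slice l (some i) (some (i + 15)) = s then i else y) := by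
  induction as with
  | nil => rfl
  | cons a t ih => simp [gLast, ih]

lemma foldl_stepY_eq_gLast (l s : List Char) (is : List Int) (y : Int) :
    is.foldl (stepY l s) y = gLast l s is.reverse y := by
  induction is generalizing y with
  | nil => rfl
  | cons i rest ih =>
      simp only [List.foldl, List.reverse_cons, gLast_append]
      exact ih _

lemma ficLast_eq_gLast (l s : List Char) (is : List Int) :
    ficLast l s is = gLast l s is (-1) := by
  induction is with
  | nil => rfl
  | cons i rest ih => simp [ficLast, gLast, ih]

-- ===== VERDICT (by name: the statement is the Claim_ definition above) =====
theorem findIndexCommand_spec : Claim_equal_findIndexCommand := by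
  intro data char string _
  unfold Spec_findIndexCommand findIndexCommand findIndexCommand_alt
  set l := data.toList
  set c := char.toList
  set s := string.toList
  rw [foldl_split]
  have hx : (PySem.List.pyRange 0 (l.length : Int) 1).foldl (stepX l c) (-1)
      = ficFirst c l 0 := by
    have := foldl_stepX_eq_ficFirst l c 0 (Nat.zero_le _)
    simpa using this
  have hrev : PySem.List.pyRange ((l.length : Int) - 1) (-1) (-1)
      = (PySem.List.pyRange 0 (l.length : Int) 1).reverse := by
    rw [PySem.List.pyRange_neg_one_eq_reverse]
    norm_num
  have hy : (PySem.List.pyRange 0 (l.length : Int) 1).foldl (stepY l s) (-1)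
      = ficLast l s (PySem.List.pyRange ((l.length : Int) - 1) (-1) (-1)) := by
    rw [foldl_stepY_eq_gLast, ficLast_eq_gLast, hrev]
  rw [hx, hy]
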